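-- pv_equiv track=rewrite | github.com/espoirMur/end-to-end-rag | src/rag/components/ingestion/pdf_scraper/parser.py | _merge_text_and_extras
-- ===== SOURCE A (Python) =====
-- from typing import Any, Iterator, Literal, Optional, Union
--
-- _PARAGRAPH_DELIMITER = [
-- 	"\n\n\n",
-- 	"\n\n",
-- ]  # To insert images or table in the middle of the page.
--
-- def _merge_text_and_extras(extras: list[str], text_from_page: str) -> str:
-- 	"""Insert extras such as image/table in a text between two paragraphs if possible,
-- 	else at the end of the text.
--
-- 	Args:
-- 	    extras: List of extra content (images/tables) to insert.
-- 	    text_from_page: The text content from the page.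
--
-- 	Returns:
-- 	    The merged text with extras inserted.
-- 	"""
--
-- 	def _recurs_merge_text_and_extras(
-- 		extras: list[str], text_from_page: str, recurs: bool
-- 	) -> Optional[str]:
-- 		if extras:
-- 			for delim in _PARAGRAPH_DELIMITER:
-- 				pos = text_from_page.rfind(delim)
-- 				if pos != -1:
-- 					# search penultimate, to bypass an error in footer
-- 					previous_text = None
-- 					if recurs:
-- 						previous_text = _recurs_merge_text_and_extras(
-- 							extras, text_from_page[:pos], False
-- 						)
-- 					if previous_text:
-- 						all_text = previous_text + text_from_page[pos:]
-- 					else: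
-- 						all_extras = ""
-- 						str_extras = "\n\n".join(filter(lambda x: x, extras))
-- 						if str_extras:
-- 							all_extras = delim + str_extras
-- 						all_text = (
-- 							text_from_page[:pos] + all_extras + text_from_page[pos:]
-- 						)
-- 					break
-- 			else:
-- 				all_text = None
-- 		else:
-- 			all_text = text_from_page
-- 		return all_text
--
-- 	all_text = _recurs_merge_text_and_extras(extras, text_from_page, True)
-- 	if not all_text:
-- 		all_extras = ""
-- 		str_extras = "\n\n".join(filter(lambda x: x, extras))
-- 		if str_extras:
-- 			all_extras = _PARAGRAPH_DELIMITER[-1] + str_extras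
-- 		all_text = text_from_page + all_extras
--
-- 	return all_text
-- ===== SOURCE B (Python) =====
-- _PARAGRAPH_DELIMITER = [
--     "\n\n\n",
--     "\n\n",
-- ]
--
--
-- def _merge_text_and_extras(extras: list, text_from_page: str) -> str:
--     """Precompute every delimiter occurrence position in one forward pass,
--     then pick the insertion point by simple index arithmetic."""
--     if not extras:
--         return text_from_page
--     str_extras = "\n\n".join(x for x in extras if x)
--     t = text_from_page
--     n = len(t)
--     occ3 = [i for i in range(n - 2) if t[i:i + 3] == "\n\n\n"]
--     occ2 = [i for i in range(n - 1) if t[i:i + 2] == "\n\n"]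
--     if occ3:
--         pos1, width1 = occ3[-1], 3
--     elif occ2:
--         pos1, width1 = occ2[-1], 2
--     else:
--         return t + ("\n\n" + str_extras if str_extras else "")
--     cand3 = [i for i in occ3 if i + 3 <= pos1]
--     cand2 = [i for i in occ2 if i + 2 <= pos1]
--     if cand3:
--         pos, width = cand3[-1], 3
--     elif cand2:
--         pos, width = cand2[-1], 2
--     else:
--         pos, width = pos1, width1
--     return t[:pos] + ("\n" * width + str_extras if str_extras else "") + t[pos:]
-- ===== Notes on version B (the rewrite author's own statement) =====
-- stated objective: alternative
-- what changed: Replaced A's recursive rfind-based search (self-recursive helper with a boolean flag re-scanning the prefix) by a precomputation: one forward pass lists every occurrence position of each delimiter, and the insertion point is then selected purely by index arithmetic on those lists.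
import Mathlib
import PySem

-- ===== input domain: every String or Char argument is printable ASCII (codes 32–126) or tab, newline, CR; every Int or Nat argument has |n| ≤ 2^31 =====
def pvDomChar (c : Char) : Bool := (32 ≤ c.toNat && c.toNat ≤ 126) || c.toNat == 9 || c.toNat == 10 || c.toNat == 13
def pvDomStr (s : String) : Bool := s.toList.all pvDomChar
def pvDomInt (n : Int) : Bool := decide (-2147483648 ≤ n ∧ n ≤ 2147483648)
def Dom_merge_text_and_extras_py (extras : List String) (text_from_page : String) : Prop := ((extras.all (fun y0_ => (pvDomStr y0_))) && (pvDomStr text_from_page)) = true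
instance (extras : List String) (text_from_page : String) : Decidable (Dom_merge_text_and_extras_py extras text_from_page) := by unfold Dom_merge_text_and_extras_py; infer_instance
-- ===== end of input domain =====

-- B replaces A's recursive rfind-based search by one forward pass that precomputes all
-- delimiter occurrence positions, then selects the insertion point by index arithmetic (objective: alternative).


-- ===== PORT A =====

-- _PARAGRAPH_DELIMITER
def pvDelims : List (List Char) := [['\n','\n','\n'], ['\n','\n']]

-- "\n\n".join(filter(lambda x: x, extras))  (both Pythons compute exactly this expression)
def pvStrExtras (extras : List String) : List Char :=
  PySem.Chars.join ['\n','\n'] ((extras.filter (fun x => x.toList ≠ [])).map String.toList)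

-- the else-branch of A: text[:pos] + all_extras + text[pos:]
def pvInsertExtras (extras : List String) (text : List Char) (delim : List Char) (pos : Int) : List Char :=
  let strExtras := pvStrExtras extras
  let allExtras := if strExtras = [] then [] else delim ++ strExtras
  PySem.List.slice text none (some pos) ++ allExtras ++ PySem.List.slice text (some pos) none

-- A's `for delim in _PARAGRAPH_DELIMITER: … break / else: all_text = None`;
-- prevf computes `previous_text` from text_from_page[:pos] (chosen by the recurs flag below)
def pvMergeLoop (extras : List String) (text : List Char)
    (prevf : List Char → Option (List Char)) : List (List Char) → Option (List Char)
  | [] => none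
  | delim :: rest =>
    let pos := PySem.Chars.rfind text delim
    if pos = -1 then pvMergeLoop extras text prevf rest
    else
      match prevf (PySem.List.slice text none (some pos)) with
      | some p => if p = [] then some (pvInsertExtras extras text delim pos)
                  else some (p ++ PySem.List.slice text (some pos) none)
      | none => some (pvInsertExtras extras text delim pos)

-- _recurs_merge_text_and_extras
def pvRecursMerge (extras : List String) (text : List Char) (recurs : Bool) : Option (List Char) :=
  if extras ≠ [] then
    pvMergeLoop extras text
      (fun pre => if recurs then pvRecursMerge extras pre false else none) pvDelims
  else some text
termination_by (if recurs then 1 else 0)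
decreasing_by simp_all

def merge_text_and_extras_py (extras : List String) (text_from_page : String) : String :=
  let t := text_from_page.toList
  let strExtras := pvStrExtras extras
  let fallback := t ++ (if strExtras = [] then [] else ['\n','\n'] ++ strExtras)
  match pvRecursMerge extras t true with
  | none => String.ofList fallback
  | some s => if s = [] then String.ofList fallback else String.ofList s

-- ===== PORT B =====

-- [i for i in range(bound) if t[i:i+w] == delim]  (one forward pass)
def pvOcc (t : List Char) (bound : Int) (w : Int) (delim : List Char) : List Int :=
  (PySem.List.pyRange 0 bound 1).filter
    (fun i => decide (PySem.List.slice t (some i) (some (i + w)) = delim))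

def merge_text_and_extras_py_alt (extras : List String) (text_from_page : String) : String :=
  if extras = [] then text_from_page
  else
    let strExtras := pvStrExtras extras
    let t := text_from_page.toList
    let n : Int := t.length
    let occ3 := pvOcc t (n - 2) 3 ['\n','\n','\n']
    let occ2 := pvOcc t (n - 1) 2 ['\n','\n']
    let outer : Option (Int × Int) :=
      match occ3.getLast? with
      | some p => some (p, 3)
      | none =>
        match occ2.getLast? with
        | some p => some (p, 2)
        | none => none
    match outer with
    | none => String.ofList (t ++ (if strExtras = [] then [] else ['\n','\n'] ++ strExtras))
    | some (pos1, w1) =>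
      let cand3 := occ3.filter (fun i => decide (i + 3 ≤ pos1))
      let cand2 := occ2.filter (fun i => decide (i + 2 ≤ pos1))
      let pw : Int × Int :=
        match cand3.getLast? with
        | some p => (p, 3)
        | none =>
          match cand2.getLast? with
          | some p => (p, 2)
          | none => (pos1, w1)
      String.ofList (PySem.List.slice t none (some pw.1)
        ++ (if strExtras = [] then [] else List.replicate pw.2.toNat '\n' ++ strExtras)
        ++ PySem.List.slice t (some pw.1) none)

-- ===== PRECONDITION & SPEC =====
def Spec_merge_text_and_extras_py (extras : List String) (text_from_page : String) (out : String) : Prop := out = merge_text_and_extras_py_alt extras text_from_page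
instance (extras : List String) (text_from_page : String) (out : String) : Decidable (Spec_merge_text_and_extras_py extras text_from_page out) := by unfold Spec_merge_text_and_extras_py; infer_instance

-- ===== CLAIM (what is proved, stated in full; the proofs are below) =====
def Claim_equal_merge_text_and_extras_py : Prop := ∀ (extras : List String) (text_from_page : String), Dom_merge_text_and_extras_py extras text_from_page → Spec_merge_text_and_extras_py extras text_from_page (merge_text_and_extras_py extras text_from_page)

-- ===== LEMMAS AND PROOFS =====

-- "o is the greatest index satisfying p (none = there is none)"
def pvGr (p : Nat → Prop) : Option Nat → Prop
  | none => ∀ j, ¬ p j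
  | some m => p m ∧ ∀ j, m < j → ¬ p j

lemma pvGr_unique {p : Nat → Prop} {o1 o2 : Option Nat} (h1 : pvGr p o1) (h2 : pvGr p o2) :
    o1 = o2 := by
  cases o1 with
  | none => cases o2 with
    | none => rfl
    | some m => exact absurd h2.1 (h1 m)
  | some m => cases o2 with
    | none => exact absurd h1.1 (h2 m)
    | some m' =>
      rcases Nat.lt_trichotomy m m' with h | h | h
      · exact absurd h2.1 (h1.2 m' h)
      · rw [h]
      · exact absurd h1.1 (h2.2 m h)

lemma pvGr_congr {p q : Nat → Prop} {o : Option Nat} (hpq : ∀ j, p j ↔ q j)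
    (h : pvGr p o) : pvGr q o := by
  cases o with
  | none => exact fun j hq => h j ((hpq j).mpr hq)
  | some m => exact ⟨(hpq m).mp h.1, fun j hj hq => h.2 j hj ((hpq j).mpr hq)⟩

-- rfind as an Option Nat
def pvRfindOpt (s sub : List Char) : Option Nat :=
  let r := PySem.Chars.rfind s sub
  if r = -1 then none else some r.toNat

lemma pv_rfind_go_gr (s sub : List Char) (k : Nat)
    (hk : ∀ j, k < j → ¬ sub <+: s.drop j) :
    pvGr (fun j => sub <+: s.drop j)
      (if PySem.Chars.rfind.go s sub k = -1 then none
       else some (PySem.Chars.rfind.go s sub k).toNat) := by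
  induction k with
  | zero =>
    simp only [PySem.Chars.rfind.go]
    by_cases hp : sub.isPrefixOf s = true
    · rw [if_pos hp, if_neg (by norm_num : ¬((0:Int) = -1))]
      refine ⟨?_, fun j hj => hk j hj⟩
      simpa using List.isPrefixOf_iff_prefix.mp hp
    · rw [if_neg hp, if_pos rfl]
      intro j
      rcases Nat.eq_zero_or_pos j with rfl | hj
      · exact fun hc => hp (List.isPrefixOf_iff_prefix.mpr (by simpa using hc))
      · exact hk j hj
  | succ k ih =>
    simp only [PySem.Chars.rfind.go]
    by_cases hp : sub.isPrefixOf (s.drop (k + 1)) = true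
    · rw [if_pos hp, if_neg (show ((k + 1 : Nat) : Int) ≠ -1 by omega), Int.toNat_natCast]
      exact ⟨List.isPrefixOf_iff_prefix.mp hp, fun j hj => hk j hj⟩
    · rw [if_neg hp]
      apply ih
      intro j hj
      rcases Nat.lt_or_ge (k + 1) j with h | h
      · exact hk j h
      · have : j = k + 1 := by omega
        subst this
        exact fun hc => hp (List.isPrefixOf_iff_prefix.mpr hc)

lemma pv_rfindOpt_gr (s sub : List Char) (hsub : sub ≠ []) :
    pvGr (fun j => sub <+: s.drop j) (pvRfindOpt s sub) := by
  unfold pvRfindOpt PySem.Chars.rfind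
  apply pv_rfind_go_gr
  intro j hj hc
  rw [List.drop_eq_nil_of_le (by omega)] at hc
  exact hsub (List.prefix_nil.mp hc)

lemma pv_rfind_go_nonneg (s sub : List Char) (k : Nat) :
    PySem.Chars.rfind.go s sub k = -1 ∨
    ∃ m : Nat, PySem.Chars.rfind.go s sub k = (m : Int) := by
  induction k with
  | zero =>
    simp only [PySem.Chars.rfind.go]
    split_ifs
    · exact Or.inr ⟨0, rfl⟩
    · exact Or.inl rfl
  | succ k ih =>
    simp only [PySem.Chars.rfind.go]
    split_ifs
    · exact Or.inr ⟨k + 1, by push_cast; ring⟩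
    · exact ih

-- either rfind = -1 (opt none) or rfind = ↑m (opt some m)
lemma pv_rfind_cases (s sub : List Char) :
    (PySem.Chars.rfind s sub = -1 ∧ pvRfindOpt s sub = none) ∨
    (∃ m : Nat, PySem.Chars.rfind s sub = (m : Int) ∧ pvRfindOpt s sub = some m) := by
  rcases pv_rfind_go_nonneg s sub s.length with h | ⟨m, h⟩
  · left
    have hr : PySem.Chars.rfind s sub = -1 := by
      unfold PySem.Chars.rfind; exact h
    exact ⟨hr, by simp [pvRfindOpt, hr]⟩
  · right
    have hr : PySem.Chars.rfind s sub = (m : Int) := by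
      unfold PySem.Chars.rfind; exact h
    exact ⟨m, hr, by simp [pvRfindOpt, hr]⟩

-- getLast? of a filtered range is the greatest index satisfying the predicate
lemma pv_lastFilterRange_gr (p : Nat → Bool) (n : Nat)
    (hout : ∀ j, n ≤ j → ¬ p j = true) :
    pvGr (fun j => p j = true) (((List.range n).filter p).getLast?) := by
  induction n with
  | zero => exact fun j hc => hout j (Nat.zero_le j) hc
  | succ n ih =>
    rw [List.range_succ, List.filter_append]
    by_cases hp : p n = true
    · simp only [List.filter_singleton, hp, cond_true]
      rw [List.getLast?_concat]
      exact ⟨hp, fun j hj => hout j hj⟩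
    · have hpf : p n = false := by simpa using hp
      simp only [List.filter_singleton, hpf, cond_false, List.append_nil]
      apply ih
      intro j hj
      rcases Nat.lt_or_ge j (n + 1) with h | h
      · have : j = n := by omega
        subst this; exact hp
      · exact hout j h

-- the slice test of B is exactly "delim is a prefix of t.drop k"
lemma pv_slice_eq_iff_prefix (t delim : List Char) (k w : Nat) (hw : delim.length = w) :
    (PySem.List.slice t (some (k : Int)) (some ((k : Int) + (w : Int))) = delim) ↔
      delim <+: t.drop k := by
  rw [PySem.List.slice_natCast_add, List.prefix_iff_eq_take, hw]
  exact eq_comm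

-- prefix inside t.take j1 = prefix in t at a position fitting before j1
lemma pv_prefix_take_iff (t delim : List Char) (k j1 : Nat) (hd : delim ≠ []) :
    delim <+: (t.take j1).drop k ↔ (delim <+: t.drop k ∧ k + delim.length ≤ j1) := by
  rw [List.drop_take]
  constructor
  · intro h
    have h1 : delim <+: t.drop k := h.trans (List.take_prefix _ _)
    have h2 := h.length_le
    rw [List.length_take] at h2
    have : 0 < delim.length := List.length_pos_of_ne_nil hd
    exact ⟨h1, by omega⟩
  · rintro ⟨h1, h2⟩
    rw [List.prefix_iff_eq_take] at h1 ⊢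
    rw [List.take_take, min_eq_left (by omega)]
    exact h1

-- an occurrence leaves room for the whole delimiter
lemma pv_occ_room {t delim : List Char} {k : Nat} (hd : delim ≠ []) (h : delim <+: t.drop k) :
    k + delim.length ≤ t.length := by
  have h1 := h.length_le
  have h2 := List.length_pos_of_ne_nil hd
  rw [List.length_drop] at h1
  omega

-- B's occurrence list, with last element described through rfind
lemma pv_occ_getLast (t delim : List Char) (w : Nat) (bound : Int)
    (hw : delim.length = w) (hd : delim ≠ [])
    (hb : bound = (t.length : Int) - ((w : Int) - 1)) :
    (pvOcc t bound (w : Int) delim).getLast? =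
      (pvRfindOpt t delim).map (fun k => (k : Int)) := by
  subst hb
  have hw0 : 0 < w := hw ▸ List.length_pos_of_ne_nil hd
  unfold pvOcc
  rw [PySem.List.pyRange_one, List.filter_map, List.getLast?_map]
  simp only [Function.comp_def, zero_add]
  have hgr := pv_lastFilterRange_gr
      (fun x => decide (PySem.List.slice t (some (x : Int)) (some ((x : Int) + (w : Int))) = delim))
      (((t.length : Int) - ((w : Int) - 1) - 0).toNat)
      (by intro j hj hc
          rw [decide_eq_true_eq, pv_slice_eq_iff_prefix t delim j w hw] at hc
          have hr := pv_occ_room hd hc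
          rw [hw] at hr
          omega)
  have hgr' := pvGr_congr (fun j => by
      rw [decide_eq_true_eq, pv_slice_eq_iff_prefix t delim j w hw]) hgr
  rw [pvGr_unique hgr' (pv_rfindOpt_gr t delim hd)]
  cases pvRfindOpt t delim <;> rfl

-- B's candidate list (occurrences fitting before pos1), through rfind on the prefix
lemma pv_cand_getLast (t delim : List Char) (w j1 : Nat) (bound : Int)
    (hw : delim.length = w) (hd : delim ≠ [])
    (hb : bound = (t.length : Int) - ((w : Int) - 1)) :
    ((pvOcc t bound (w : Int) delim).filter
        (fun i => decide (i + (w : Int) ≤ (j1 : Int)))).getLast? =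
      (pvRfindOpt (t.take j1) delim).map (fun k => (k : Int)) := by
  subst hb
  have hw0 : 0 < w := hw ▸ List.length_pos_of_ne_nil hd
  unfold pvOcc
  rw [PySem.List.pyRange_one, List.filter_map, List.filter_map, List.filter_filter,
      List.getLast?_map]
  simp only [Function.comp_def, zero_add]
  have hgr := pv_lastFilterRange_gr
      (fun x => decide ((x : Int) + (w : Int) ≤ (j1 : Int))
        && decide (PySem.List.slice t (some (x : Int)) (some ((x : Int) + (w : Int))) = delim))
      (((t.length : Int) - ((w : Int) - 1) - 0).toNat)
      (by intro j hj hc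
          rw [Bool.and_eq_true, decide_eq_true_eq, decide_eq_true_eq,
              pv_slice_eq_iff_prefix t delim j w hw] at hc
          have hr := pv_occ_room hd hc.2
          rw [hw] at hr
          omega)
  have hgr' := pvGr_congr (q := fun j => delim <+: (t.take j1).drop j) (fun j => by
      beta_reduce
      rw [Bool.and_eq_true, decide_eq_true_eq, decide_eq_true_eq,
          pv_slice_eq_iff_prefix t delim j w hw, pv_prefix_take_iff t delim j j1 hd, hw]
      constructor
      · rintro ⟨h1, h2⟩
        exact ⟨h2, by exact_mod_cast h1⟩
      · rintro ⟨h1, h2⟩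
        exact ⟨by exact_mod_cast h2, h1⟩) hgr
  rw [pvGr_unique hgr' (pv_rfindOpt_gr (t.take j1) delim hd)]
  cases pvRfindOpt (t.take j1) delim <;> rfl

-- A's delimiter scan, restructured (proof-side only)
def pvLastDelimLoop (s : List Char) : List (List Char) → Option (Int × List Char)
  | [] => none
  | delim :: rest =>
    let pos := PySem.Chars.rfind s delim
    if pos = -1 then pvLastDelimLoop s rest else some (pos, delim)

def pvLastDelim (s : List Char) : Option (Int × List Char) := pvLastDelimLoop s pvDelims

-- the loop over the delimiters, re-expressed through pvLastDelim
lemma pv_mergeLoop_eq (extras : List String) (text : List Char)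
    (prevf : List Char → Option (List Char)) (ds : List (List Char)) :
    pvMergeLoop extras text prevf ds =
      match pvLastDelimLoop text ds with
      | none => none
      | some (pos, delim) =>
        match prevf (PySem.List.slice text none (some pos)) with
        | some p => if p = [] then some (pvInsertExtras extras text delim pos)
                    else some (p ++ PySem.List.slice text (some pos) none)
        | none => some (pvInsertExtras extras text delim pos) := by
  induction ds with
  | nil => simp [pvMergeLoop, pvLastDelimLoop]
  | cons d rest ih =>
    simp only [pvMergeLoop, pvLastDelimLoop]
    split_ifs with hd
    · simpa using ih
    · rfl

-- A's scan, expressed through pvRfindOpt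
lemma pv_lastDelim_eq (s : List Char) :
    pvLastDelim s =
      match pvRfindOpt s ['\n','\n','\n'] with
      | some j => some ((j : Int), ['\n','\n','\n'])
      | none =>
        match pvRfindOpt s ['\n','\n'] with
        | some j => some ((j : Int), ['\n','\n'])
        | none => none := by
  unfold pvLastDelim pvLastDelimLoop pvDelims
  rcases pv_rfind_cases s ['\n','\n','\n'] with ⟨h3, h3o⟩ | ⟨m3, h3, h3o⟩
  · rcases pv_rfind_cases s ['\n','\n'] with ⟨h2, h2o⟩ | ⟨m2, h2, h2o⟩
    · simp [h3, h2, h3o, h2o, pvLastDelimLoop]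
    · simp [h3, h2, h3o, h2o, pvLastDelimLoop]
  · simp [h3, h3o]

-- an insertion into a nonempty text is nonempty
lemma pv_insert_ne_nil (extras : List String) (s : List Char) (delim : List Char) (j : Nat)
    (hs : s ≠ []) : pvInsertExtras extras s delim (j : Int) ≠ [] := by
  simp only [pvInsertExtras, PySem.List.slice_to_natCast, PySem.List.slice_from_natCast]
  intro hc
  simp only [List.append_eq_nil_iff] at hc
  have : s.take j ++ s.drop j = [] := by rw [hc.1.1, hc.2]; rfl
  rw [List.take_append_drop] at this
  exact hs this

-- a text with an occurrence is nonempty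
lemma pv_ne_nil_of_prefix {s delim : List Char} {j : Nat} (hd : delim ≠ [])
    (h : delim <+: s.drop j) : s ≠ [] := by
  rintro rfl
  simp only [List.drop_nil] at h
  exact hd (List.prefix_nil.mp h)

-- the final string algebra: inserting in the prefix then appending the tail = inserting in the text
lemma pv_insert_prefix_append (extras : List String) (t : List Char) (delim : List Char)
    (j1 j2 : Nat) (hj : j2 ≤ j1) :
    pvInsertExtras extras (t.take j1) delim (j2 : Int) ++ PySem.List.slice t (some (j1 : Int)) none =
      PySem.List.slice t none (some (j2 : Int))
        ++ (if pvStrExtras extras = [] then [] else delim ++ pvStrExtras extras)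
        ++ PySem.List.slice t (some (j2 : Int)) none := by
  simp only [pvInsertExtras, PySem.List.slice_to_natCast, PySem.List.slice_from_natCast]
  have h1 : (t.take j1).take j2 = t.take j2 := by
    rw [List.take_take, min_eq_left hj]
  have h2 : (t.take j1).drop j2 ++ t.drop j1 = t.drop j2 := by
    rw [List.drop_take]
    have h3 : t.drop j1 = (t.drop j2).drop (j1 - j2) := by
      rw [List.drop_drop]; congr 1; omega
    rw [h3, List.take_append_drop]
  simp only [List.append_assoc, h1, ← h2]

-- specialized forms matching the literals in the ports
lemma pv_occ3 (t : List Char) :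
    (pvOcc t ((t.length : Int) - 2) 3 ['\n','\n','\n']).getLast? =
      (pvRfindOpt t ['\n','\n','\n']).map (fun k => (k : Int)) := by
  have h := pv_occ_getLast t ['\n','\n','\n'] 3 ((t.length : Int) - 2) rfl (by simp)
      (by push_cast; ring)
  exact h

lemma pv_occ2 (t : List Char) :
    (pvOcc t ((t.length : Int) - 1) 2 ['\n','\n']).getLast? =
      (pvRfindOpt t ['\n','\n']).map (fun k => (k : Int)) := by
  have h := pv_occ_getLast t ['\n','\n'] 2 ((t.length : Int) - 1) rfl (by simp)
      (by push_cast; ring)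
  exact h

lemma pv_cand3 (t : List Char) (j1 : Nat) :
    ((pvOcc t ((t.length : Int) - 2) 3 ['\n','\n','\n']).filter
        (fun i => decide (i + 3 ≤ (j1 : Int)))).getLast? =
      (pvRfindOpt (t.take j1) ['\n','\n','\n']).map (fun k => (k : Int)) := by
  have h := pv_cand_getLast t ['\n','\n','\n'] 3 j1 ((t.length : Int) - 2) rfl (by simp)
      (by push_cast; ring)
  exact h

lemma pv_cand2 (t : List Char) (j1 : Nat) :
    ((pvOcc t ((t.length : Int) - 1) 2 ['\n','\n']).filter
        (fun i => decide (i + 2 ≤ (j1 : Int)))).getLast? =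
      (pvRfindOpt (t.take j1) ['\n','\n']).map (fun k => (k : Int)) := by
  have h := pv_cand_getLast t ['\n','\n'] 2 j1 ((t.length : Int) - 1) rfl (by simp)
      (by push_cast; ring)
  exact h

lemma pv_occ3_none (t : List Char) (h : pvRfindOpt t ['\n','\n','\n'] = none) :
    (pvOcc t ((t.length : Int) - 2) 3 ['\n','\n','\n']).getLast? = none := by
  rw [pv_occ3, h]; rfl

lemma pv_occ3_some (t : List Char) (m : Nat) (h : pvRfindOpt t ['\n','\n','\n'] = some m) :
    (pvOcc t ((t.length : Int) - 2) 3 ['\n','\n','\n']).getLast? = some ((m : Int)) := by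
  rw [pv_occ3, h]; rfl

lemma pv_occ2_none (t : List Char) (h : pvRfindOpt t ['\n','\n'] = none) :
    (pvOcc t ((t.length : Int) - 1) 2 ['\n','\n']).getLast? = none := by
  rw [pv_occ2, h]; rfl

lemma pv_occ2_some (t : List Char) (m : Nat) (h : pvRfindOpt t ['\n','\n'] = some m) :
    (pvOcc t ((t.length : Int) - 1) 2 ['\n','\n']).getLast? = some ((m : Int)) := by
  rw [pv_occ2, h]; rfl

lemma pv_cand3_none (t : List Char) (j1 : Nat) (h : pvRfindOpt (t.take j1) ['\n','\n','\n'] = none) :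
    ((pvOcc t ((t.length : Int) - 2) 3 ['\n','\n','\n']).filter
        (fun i => decide (i + 3 ≤ (j1 : Int)))).getLast? = none := by
  rw [pv_cand3, h]; rfl

lemma pv_cand3_some (t : List Char) (j1 m : Nat) (h : pvRfindOpt (t.take j1) ['\n','\n','\n'] = some m) :
    ((pvOcc t ((t.length : Int) - 2) 3 ['\n','\n','\n']).filter
        (fun i => decide (i + 3 ≤ (j1 : Int)))).getLast? = some ((m : Int)) := by
  rw [pv_cand3, h]; rfl

lemma pv_cand2_none (t : List Char) (j1 : Nat) (h : pvRfindOpt (t.take j1) ['\n','\n'] = none) :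
    ((pvOcc t ((t.length : Int) - 1) 2 ['\n','\n']).filter
        (fun i => decide (i + 2 ≤ (j1 : Int)))).getLast? = none := by
  rw [pv_cand2, h]; rfl

lemma pv_cand2_some (t : List Char) (j1 m : Nat) (h : pvRfindOpt (t.take j1) ['\n','\n'] = some m) :
    ((pvOcc t ((t.length : Int) - 1) 2 ['\n','\n']).filter
        (fun i => decide (i + 2 ≤ (j1 : Int)))).getLast? = some ((m : Int)) := by
  rw [pv_cand2, h]; rfl

-- a `some` answer of A's scan is a genuine occurrence
lemma pv_lastDelim_some_spec (s : List Char) (p : Int) (d : List Char)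
    (h : pvLastDelim s = some (p, d)) :
    ∃ j : Nat, p = (j : Int) ∧ d <+: s.drop j ∧ d ≠ [] := by
  rw [pv_lastDelim_eq] at h
  cases ho3 : pvRfindOpt s ['\n','\n','\n'] with
  | some m =>
    rw [ho3] at h
    simp only [Option.some.injEq, Prod.mk.injEq] at h
    have hgr := pv_rfindOpt_gr s ['\n','\n','\n'] (by simp)
    rw [ho3] at hgr
    exact ⟨m, h.1.symm, h.2 ▸ hgr.1, by rw [← h.2]; simp⟩
  | none =>
    rw [ho3] at h
    cases ho2 : pvRfindOpt s ['\n','\n'] with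
    | some m =>
      rw [ho2] at h
      simp only [Option.some.injEq, Prod.mk.injEq] at h
      have hgr := pv_rfindOpt_gr s ['\n','\n'] (by simp)
      rw [ho2] at hgr
      exact ⟨m, h.1.symm, h.2 ▸ hgr.1, by rw [← h.2]; simp⟩
    | none => rw [ho2] at h; exact absurd h (by simp)

-- the non-recursive inner call, through pvLastDelim
lemma pv_recursMerge_false (extras : List String) (t : List Char) (hex : extras ≠ []) :
    pvRecursMerge extras t false =
      match pvLastDelim t with
      | none => none
      | some (p, d) => some (pvInsertExtras extras t d p) := by
  rw [pvRecursMerge.eq_def, if_pos hex, pv_mergeLoop_eq]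
  show (match pvLastDelim t with
    | none => none
    | some (pos, delim) => _) = _
  cases pvLastDelim t with
  | none => rfl
  | some pd => rfl

-- the top-level recursive call, through pvLastDelim
lemma pv_recursMerge_true (extras : List String) (t : List Char) (hex : extras ≠ []) :
    pvRecursMerge extras t true =
      match pvLastDelim t with
      | none => none
      | some (p, d) =>
        match pvLastDelim (PySem.List.slice t none (some p)) with
        | some (p2, d2) =>
            some (pvInsertExtras extras (PySem.List.slice t none (some p)) d2 p2
              ++ PySem.List.slice t (some p) none)
        | none => some (pvInsertExtras extras t d p) := by
  rw [pvRecursMerge.eq_def, if_pos hex, pv_mergeLoop_eq]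
  show (match pvLastDelim t with
    | none => none
    | some (pos, delim) => _) = _
  cases h1 : pvLastDelim t with
  | none => rfl
  | some pd =>
    obtain ⟨p, d⟩ := pd
    dsimp only
    rw [pv_recursMerge_false extras _ hex]
    cases h2 : pvLastDelim (PySem.List.slice t none (some p)) with
    | none => rfl
    | some pd2 =>
      obtain ⟨p2, d2⟩ := pd2
      obtain ⟨j2, rfl, hpre, hdne⟩ := pv_lastDelim_some_spec _ _ _ h2
      have hs : PySem.List.slice t none (some p) ≠ [] := pv_ne_nil_of_prefix hdne hpre
      simp only [if_pos trivial]
      rw [if_neg (pv_insert_ne_nil extras _ d2 j2 hs)]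

-- ===== VERDICT (by name: the statement is the Claim_ definition above) =====
theorem merge_text_and_extras_py_spec : Claim_equal_merge_text_and_extras_py := by
  intro extras text _
  unfold Spec_merge_text_and_extras_py merge_text_and_extras_py merge_text_and_extras_py_alt
  by_cases hex : extras = []
  · subst hex
    have hse : pvStrExtras [] = [] := rfl
    dsimp only [letFun]
    rw [pvRecursMerge.eq_def]
    simp [hse, String.ofList_toList]
  · dsimp only [letFun]
    rw [pv_recursMerge_true extras _ hex, if_neg hex]
    rw [pv_lastDelim_eq]
    rcases pv_rfind_cases text.toList ['\n','\n','\n'] with ⟨h3, h3o⟩ | ⟨m3, h3, h3o⟩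
    · rw [h3o, pv_occ3_none text.toList h3o]
      rcases pv_rfind_cases text.toList ['\n','\n'] with ⟨h2, h2o⟩ | ⟨m2, h2, h2o⟩
      · rw [h2o, pv_occ2_none text.toList h2o]
      · -- outer delimiter "\n\n" at m2
        rw [h2o, pv_occ2_some text.toList m2 h2o]
        dsimp only
        have hOo := h2o
        have hgrO := pv_rfindOpt_gr text.toList ['\n','\n'] (by simp)
        rw [hOo] at hgrO
        rw [pv_lastDelim_eq, PySem.List.slice_to_natCast]
        rcases pv_rfind_cases (text.toList.take m2) ['\n','\n','\n'] with ⟨g3, g3o⟩ | ⟨j2, g3, g3o⟩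
        · rw [g3o, pv_cand3_none text.toList m2 g3o]
          rcases pv_rfind_cases (text.toList.take m2) ['\n','\n'] with ⟨g2, g2o⟩ | ⟨j2, g2, g2o⟩
          · rw [g2o, pv_cand2_none text.toList m2 g2o]
            dsimp only
            have ht : text.toList ≠ [] := pv_ne_nil_of_prefix (by simp) hgrO.1
            rw [if_neg (pv_insert_ne_nil extras _ _ m2 ht)]
            rfl
          · rw [g2o, pv_cand2_some text.toList m2 j2 g2o]
            dsimp only
            have hgrI := pv_rfindOpt_gr (text.toList.take m2) ['\n','\n'] (by simp)
            rw [g2o] at hgrI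
            have hs : text.toList.take m2 ≠ [] := pv_ne_nil_of_prefix (by simp) hgrI.1
            have hne := pv_insert_ne_nil extras _ ['\n','\n'] j2 hs
            rw [if_neg (fun hc => hne (List.append_eq_nil_iff.mp hc).1)]
            have hj : j2 ≤ m2 := by
              have := hgrI.1.length_le
              simp only [List.length_drop, List.length_take, List.length_cons,
                List.length_nil] at this
              omega
            congr 1
            exact pv_insert_prefix_append extras text.toList ['\n','\n'] m2 j2 hj
        · rw [g3o, pv_cand3_some text.toList m2 j2 g3o]
          dsimp only
          have hgrI := pv_rfindOpt_gr (text.toList.take m2) ['\n','\n','\n'] (by simp)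
          rw [g3o] at hgrI
          have hs : text.toList.take m2 ≠ [] := pv_ne_nil_of_prefix (by simp) hgrI.1
          have hne := pv_insert_ne_nil extras _ ['\n','\n','\n'] j2 hs
          rw [if_neg (fun hc => hne (List.append_eq_nil_iff.mp hc).1)]
          have hj : j2 ≤ m2 := by
            have := hgrI.1.length_le
            simp only [List.length_drop, List.length_take, List.length_cons,
              List.length_nil] at this
            omega
          congr 1
          exact pv_insert_prefix_append extras text.toList ['\n','\n','\n'] m2 j2 hj
    · -- outer delimiter "\n\n\n" at m3
      rw [h3o, pv_occ3_some text.toList m3 h3o]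
      dsimp only
      have hOo := h3o
      have hgrO := pv_rfindOpt_gr text.toList ['\n','\n','\n'] (by simp)
      rw [hOo] at hgrO
      rw [pv_lastDelim_eq, PySem.List.slice_to_natCast]
      rcases pv_rfind_cases (text.toList.take m3) ['\n','\n','\n'] with ⟨g3, g3o⟩ | ⟨j2, g3, g3o⟩
      · rw [g3o, pv_cand3_none text.toList m3 g3o]
        rcases pv_rfind_cases (text.toList.take m3) ['\n','\n'] with ⟨g2, g2o⟩ | ⟨j2, g2, g2o⟩
        · rw [g2o, pv_cand2_none text.toList m3 g2o]
          dsimp only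
          have ht : text.toList ≠ [] := pv_ne_nil_of_prefix (by simp) hgrO.1
          rw [if_neg (pv_insert_ne_nil extras _ _ m3 ht)]
          rfl
        · rw [g2o, pv_cand2_some text.toList m3 j2 g2o]
          dsimp only
          have hgrI := pv_rfindOpt_gr (text.toList.take m3) ['\n','\n'] (by simp)
          rw [g2o] at hgrI
          have hs : text.toList.take m3 ≠ [] := pv_ne_nil_of_prefix (by simp) hgrI.1
          have hne := pv_insert_ne_nil extras _ ['\n','\n'] j2 hs
          rw [if_neg (fun hc => hne (List.append_eq_nil_iff.mp hc).1)]
          have hj : j2 ≤ m3 := by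
            have := hgrI.1.length_le
            simp only [List.length_drop, List.length_take, List.length_cons,
              List.length_nil] at this
            omega
          congr 1
          exact pv_insert_prefix_append extras text.toList ['\n','\n'] m3 j2 hj
      · rw [g3o, pv_cand3_some text.toList m3 j2 g3o]
        dsimp only
        have hgrI := pv_rfindOpt_gr (text.toList.take m3) ['\n','\n','\n'] (by simp)
        rw [g3o] at hgrI
        have hs : text.toList.take m3 ≠ [] := pv_ne_nil_of_prefix (by simp) hgrI.1
        have hne := pv_insert_ne_nil extras _ ['\n','\n','\n'] j2 hs
        rw [if_neg (fun hc => hne (List.append_eq_nil_iff.mp hc).1)]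
        have hj : j2 ≤ m3 := by
          have := hgrI.1.length_le
          simp only [List.length_drop, List.length_take, List.length_cons,
            List.length_nil] at this
          omega
        congr 1
        exact pv_insert_prefix_append extras text.toList ['\n','\n','\n'] m3 j2 hj
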